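-- pv_equiv track=rewrite | github.com/ltskinner/date-recognizer | pipline.py | textMonthFinder
-- ===== SOURCE A (Python) =====
-- def textMonthFinder(text):
--     mo = [
--         'january', 'february', 'march', 'april', 'may', 'june', 'july', 'august', 'september', 'october', 'november', 'december',
--         'jan', 'feb', 'mar', 'apr', 'may', 'jun', 'jul', 'aug', 'sep', 'oct', 'nov', 'dec'
--     ]
--
--     for i in mo:
--         if i in text.lower():
--             return True
--     return False
-- ===== SOURCE B (Python) =====
-- def textMonthFinder(text):
--     t = text.lower()
--     codes = {'jan', 'feb', 'mar', 'apr', 'may', 'jun',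
--              'jul', 'aug', 'sep', 'oct', 'nov', 'dec'}
--     return any(t[i:i + 3] in codes for i in range(len(t) - 2))
-- ===== Notes on version B (the rewrite author's own statement) =====
-- stated objective: alternative
-- what changed: Instead of scanning the text 24 times (once per month name), B makes a single left-to-right pass checking each 3-character window against the set of 12 month abbreviations, which is equivalent because every full month name starts with its abbreviation.
import Mathlib
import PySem

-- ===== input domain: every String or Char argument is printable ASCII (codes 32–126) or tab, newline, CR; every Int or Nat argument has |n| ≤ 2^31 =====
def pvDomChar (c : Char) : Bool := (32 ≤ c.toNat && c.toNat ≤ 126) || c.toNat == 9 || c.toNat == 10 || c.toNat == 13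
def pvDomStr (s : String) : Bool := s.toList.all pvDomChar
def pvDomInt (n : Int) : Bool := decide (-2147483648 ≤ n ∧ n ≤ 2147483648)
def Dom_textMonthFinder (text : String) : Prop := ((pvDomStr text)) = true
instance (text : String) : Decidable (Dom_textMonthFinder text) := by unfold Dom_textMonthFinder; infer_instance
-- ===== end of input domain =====

-- B replaces A's 24 separate substring scans by one left-to-right pass over 3-char windows
-- against the 12 month abbreviations (every full month name starts with its abbreviation);
-- alternative algorithm, same return value.

-- ===== PORT A =====
def pvMoA : List String :=
  ["january", "february", "march", "april", "may", "june", "july", "august",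
   "september", "october", "november", "december",
   "jan", "feb", "mar", "apr", "may", "jun", "jul", "aug", "sep", "oct", "nov", "dec"]

-- the 'for i in mo: if i in text.lower(): return True' loop, early return as recursion
def pvTmfGo (text : String) : List String → Bool
  | [] => false
  | m :: rest =>
      if PySem.Str.isIn m (PySem.Str.lower text) then true else pvTmfGo text rest

def textMonthFinder (text : String) : Bool := pvTmfGo text pvMoA

-- ===== PORT B =====
-- the 12 abbreviations, as char lists (strings are handled on the .toList side)
def pvCodes : List (List Char) :=
  [['j','a','n'], ['f','e','b'], ['m','a','r'], ['a','p','r'], ['m','a','y'], ['j','u','n'],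
   ['j','u','l'], ['a','u','g'], ['s','e','p'], ['o','c','t'], ['n','o','v'], ['d','e','c']]

-- any(t[i:i+3] in codes for i in range(len(t) - 2))
def textMonthFinder_alt (text : String) : Bool :=
  let t := (PySem.Str.lower text).toList
  (PySem.List.pyRange 0 ((t.length : Int) - 2) 1).any
    (fun i => pvCodes.contains (PySem.List.slice t (some i) (some (i + 3))))

-- ===== PRECONDITION & SPEC =====
def Spec_textMonthFinder (text : String) (out : Bool) : Prop := out = textMonthFinder_alt text
instance (text : String) (out : Bool) : Decidable (Spec_textMonthFinder text out) := by unfold Spec_textMonthFinder; infer_instance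

-- ===== CLAIM (what is proved, stated in full; the proofs are below) =====
def Claim_equal_textMonthFinder : Prop := ∀ (text : String), Dom_textMonthFinder text → Spec_textMonthFinder text (textMonthFinder text)

-- ===== LEMMAS AND PROOFS =====

theorem pvTmfGo_any (text : String) (l : List String) :
    pvTmfGo text l = l.any (fun m => PySem.Str.isIn m (PySem.Str.lower text)) := by
  induction l with
  | nil => rfl
  | cons m rest ih =>
      simp only [pvTmfGo, List.any_cons, ih]
      by_cases h : PySem.Str.isIn m (PySem.Str.lower text) = true <;> simp_all

theorem pvA_iff (text : String) :
    textMonthFinder text = true ↔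
      ∃ m ∈ pvMoA, m.toList <:+: (PySem.Str.lower text).toList := by
  simp [textMonthFinder, pvTmfGo_any, List.any_eq_true, PySem.Chars.isIn_iff_infix]

-- every month name in A's list starts with one of B's abbreviations
theorem pvMo_to_codes : ∀ m ∈ pvMoA, ∃ c ∈ pvCodes, c <+: m.toList := by decide

-- every abbreviation of B is itself a name in A's list
theorem pvCodes_to_mo : ∀ c ∈ pvCodes, ∃ m ∈ pvMoA, c = m.toList := by decide

theorem pvCodes_len : ∀ c ∈ pvCodes, c.length = 3 := by decide

theorem pvB_iff (text : String) :
    textMonthFinder_alt text = true ↔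
      ∃ c ∈ pvCodes, c <:+: (PySem.Str.lower text).toList := by
  set l := (PySem.Str.lower text).toList with hl
  simp only [textMonthFinder_alt, ← hl, List.any_eq_true, PySem.List.mem_pyRange_one]
  constructor
  · rintro ⟨i, ⟨hi0, hilt⟩, hc⟩
    have hc' : PySem.List.slice l (some i) (some (i + 3)) ∈ pvCodes := by
      simpa using hc
    refine ⟨_, hc', ?_⟩
    rw [PySem.List.slice_toNat l hi0 (by omega : (0:Int) ≤ i + 3)]
    exact ((l.drop i.toNat).take_prefix _).isInfix.trans (l.drop_suffix i.toNat).isInfix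
  · rintro ⟨c, hcmem, pre, suf, hsplit⟩
    have hclen : c.length = 3 := pvCodes_len c hcmem
    have hlen : pre.length + (c.length + suf.length) = l.length := by
      rw [← hsplit]; simp
    refine ⟨(pre.length : Int), ⟨by positivity, by omega⟩, ?_⟩
    have : PySem.List.slice l (some (pre.length : Int)) (some ((pre.length : Int) + (3 : Int)))
        = (l.drop pre.length).take 3 := by
      have := PySem.List.slice_natCast_add l pre.length 3
      simpa using this
    rw [this]
    have hdrop : l.drop pre.length = c ++ suf := by
      rw [← hsplit]; simp
    rw [hdrop, ← hclen, List.take_left]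
    simpa using hcmem

-- ===== VERDICT (by name: the statement is the Claim_ definition above) =====
theorem textMonthFinder_spec : Claim_equal_textMonthFinder := by
  intro text _
  unfold Spec_textMonthFinder
  have hA := pvA_iff text
  have hB := pvB_iff text
  have hAB : textMonthFinder text = true ↔ textMonthFinder_alt text = true := by
    rw [hA, hB]
    constructor
    · rintro ⟨m, hm, hinf⟩
      obtain ⟨c, hc, hpre⟩ := pvMo_to_codes m hm
      exact ⟨c, hc, hpre.isInfix.trans hinf⟩
    · rintro ⟨c, hc, hinf⟩
      obtain ⟨m, hm, rfl⟩ := pvCodes_to_mo c hc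
      exact ⟨m, hm, hinf⟩
  cases hx : textMonthFinder text <;> cases hy : textMonthFinder_alt text <;> simp_all
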